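-- pv_equiv track=rewrite | github.com/jiaxy/EHAdvisor | replication/Train/top.py | DelTwoLength
-- ===== SOURCE A (Python) =====
-- def DelTwoLength(targetList,splitList):
--     twolengthnum = 0
--     listLength = len(targetList)
--     for i in range(listLength):
--         if len(splitList[listLength-i-1])<3:
--             twolengthnum=twolengthnum+1
--             del(targetList[listLength-i-1])
--             del(splitList[listLength-i-1])
--     return targetList,splitList,twolengthnum
-- ===== SOURCE B (Python) =====
-- def DelTwoLength(targetList, splitList):
--     removed = 0
--     w = 0
--     for i in range(len(targetList)):
--         if len(splitList[i]) < 3: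
--             removed += 1
--         else:
--             targetList[w] = targetList[i]
--             splitList[w] = splitList[i]
--             w += 1
--     del targetList[w:w + removed]
--     del splitList[w:w + removed]
--     return targetList, splitList, removed
-- ===== Notes on version B (the rewrite author's own statement) =====
-- stated objective: alternative
-- what changed: Replaces A's backward index loop with one single-element del per removal (each del shifts the whole list tail) by a forward two-pointer compaction that overwrites kept entries in place and finishes with a single slice-delete per list; Pre_ excludes only inputs where A raises IndexError (splitList shorter than targetList).
import Mathlib
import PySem

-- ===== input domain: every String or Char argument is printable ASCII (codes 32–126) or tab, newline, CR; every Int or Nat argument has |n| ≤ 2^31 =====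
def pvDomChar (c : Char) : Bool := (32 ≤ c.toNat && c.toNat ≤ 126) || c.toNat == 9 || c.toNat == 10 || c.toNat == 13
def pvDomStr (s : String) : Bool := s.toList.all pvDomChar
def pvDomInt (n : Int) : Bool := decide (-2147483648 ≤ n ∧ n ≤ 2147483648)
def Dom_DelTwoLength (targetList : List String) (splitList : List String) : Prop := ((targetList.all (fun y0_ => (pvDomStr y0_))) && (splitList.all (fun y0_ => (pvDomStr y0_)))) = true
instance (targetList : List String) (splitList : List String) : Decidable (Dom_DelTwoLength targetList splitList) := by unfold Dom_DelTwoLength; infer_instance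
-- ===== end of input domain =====

-- B replaces A's backward scan with repeated single-element `del` by a forward two-pointer
-- compaction and one slice-delete per list; equivalence is about the RETURN value only
-- (both Pythons mutate the argument lists in place).

-- ===== PORT A =====
-- loop body: one iteration of A's `for i in range(listLength)` (listLength is the ORIGINAL length n)
def pvBodyA (n : Nat) (st : List String × List String × Int) (i : Nat) :
    List String × List String × Int :=
  let k := n - i - 1
  match PySem.List.pyGet? st.2.1 (k : Int) with
  | some w =>
      if PySem.Str.len w < 3 then (st.1.eraseIdx k, st.2.1.eraseIdx k, st.2.2 + 1) else st
  | none => st  -- IndexError in Python; excluded by Pre_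

def DelTwoLength (targetList : List String) (splitList : List String) :
    List String × List String × Int :=
  (List.range targetList.length).foldl (pvBodyA targetList.length) (targetList, splitList, 0)

-- ===== PORT B =====
-- loop body of B's `for i in range(len(targetList))`; state = (targetList, splitList, w, removed)
def pvBodyB (st : List String × List String × Nat × Int) (i : Nat) :
    List String × List String × Nat × Int :=
  match PySem.List.pyGet? st.2.1 (i : Int) with
  | some x =>
      if PySem.Str.len x < 3 then (st.1, st.2.1, st.2.2.1, st.2.2.2 + 1)
      else
        match PySem.List.pyGet? st.1 (i : Int) with
        | some y => (st.1.set st.2.2.1 y, st.2.1.set st.2.2.1 x, st.2.2.1 + 1, st.2.2.2)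
        | none => st
  | none => st  -- IndexError in Python; excluded by Pre_

def DelTwoLength_alt (targetList : List String) (splitList : List String) :
    List String × List String × Int :=
  let st := (List.range targetList.length).foldl pvBodyB (targetList, splitList, 0, 0)
  -- `del l[w:w+removed]`: exact for the 0 ≤ w, 0 ≤ removed this loop produces
  ( st.1.take st.2.2.1 ++ st.1.drop (st.2.2.1 + st.2.2.2.toNat),
    st.2.1.take st.2.2.1 ++ st.2.1.drop (st.2.2.1 + st.2.2.2.toNat),
    st.2.2.2 )

-- ===== PRECONDITION & SPEC =====
-- Pre_ excludes exactly the inputs where A raises IndexError: splitList shorter than targetList.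
def Pre_DelTwoLength (targetList : List String) (splitList : List String) : Prop :=
  targetList.length ≤ splitList.length
instance (targetList : List String) (splitList : List String) : Decidable (Pre_DelTwoLength targetList splitList) := by unfold Pre_DelTwoLength; infer_instance

def pvWitness_DelTwoLength : List String × List String := (["ab", "cde"], ["xyz", "uv"])

def Spec_DelTwoLength (targetList : List String) (splitList : List String) (out : List String × List String × Int) : Prop := out = DelTwoLength_alt targetList splitList
instance (targetList : List String) (splitList : List String) (out : List String × List String × Int) : Decidable (Spec_DelTwoLength targetList splitList out) := by unfold Spec_DelTwoLength; infer_instance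

-- ===== CLAIM (what is proved, stated in full; the proofs are below) =====
def Claim_equal_DelTwoLength : Prop := ∀ (targetList : List String) (splitList : List String), Dom_DelTwoLength targetList splitList → Pre_DelTwoLength targetList splitList → Spec_DelTwoLength targetList splitList (DelTwoLength targetList splitList)

-- ===== LEMMAS AND PROOFS =====

-- the pairs kept among the first i (target, split) pairs
def pvKept (t s : List String) (i : Nat) : List (String × String) :=
  ((t.zip s).take i).filter (fun p => 3 ≤ PySem.Str.len p.2)

-- zip ignores the part of its second list beyond the first list's length
theorem pvZipTake (t s : List String) : t.zip (s.take t.length) = t.zip s := by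
  induction t generalizing s with
  | nil => simp
  | cons a t ih =>
      cases s with
      | nil => simp
      | cons b s => simp [ih]

-- One A-iteration at index i < n on lists with an extra head acts below the head.
theorem pvBodyA_cons (n i : Nat) (hi : i < n) (a b : String)
    (t s : List String) (c : Int) :
    pvBodyA (n + 1) (a :: t, b :: s, c) i =
      ((pvBodyA n (t, s, c) i).1.cons a, (pvBodyA n (t, s, c) i).2.1.cons b,
        (pvBodyA n (t, s, c) i).2.2) := by
  have hk : n + 1 - i - 1 = (n - i - 1) + 1 := by omega
  have hcast : (((n - i - 1) + 1 : Nat) : Int) = ((n - i - 1 : Nat) : Int) + 1 := by push_cast; ring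
  simp only [pvBodyA, hk, hcast, PySem.List.pyGet?_cons_succ]
  cases PySem.List.pyGet? s ((n - i - 1 : Nat) : Int) with
  | none => rfl
  | some w =>
      dsimp only
      split_ifs <;> simp [List.eraseIdx_cons_succ]

-- Frame: the first m iterations (indices n-i ≥ 1) of the (n+1)-loop never touch the heads.
theorem pvFoldA_cons (m n : Nat) (hmn : m ≤ n) (a b : String)
    (t s : List String) (c : Int) :
    (List.range m).foldl (pvBodyA (n + 1)) (a :: t, b :: s, c) =
      (((List.range m).foldl (pvBodyA n) (t, s, c)).1.cons a,
        ((List.range m).foldl (pvBodyA n) (t, s, c)).2.1.cons b,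
        ((List.range m).foldl (pvBodyA n) (t, s, c)).2.2) := by
  induction m with
  | zero => simp
  | succ m ih =>
      have hm : m ≤ n := Nat.le_of_succ_le hmn
      rw [List.range_succ, List.foldl_append, List.foldl_append]
      rw [ih hm]
      simp only [List.foldl_cons, List.foldl_nil]
      exact pvBodyA_cons n m (Nat.lt_of_succ_le hmn) a b _ _ _

-- Value of A's loop: with |t| = |s₀| and untouched tail v, it keeps the zip/filter survivors.
theorem pvLoopA_eq : ∀ (t s₀ v : List String) (c : Int), t.length = s₀.length →
    (List.range t.length).foldl (pvBodyA t.length) (t, s₀ ++ v, c) =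
      (((t.zip s₀).filter (fun p => 3 ≤ PySem.Str.len p.2)).map Prod.fst,
        (((t.zip s₀).filter (fun p => 3 ≤ PySem.Str.len p.2)).map Prod.snd) ++ v,
        c + (t.length : Int) -
          ((t.zip s₀).filter (fun p => 3 ≤ PySem.Str.len p.2)).length) := by
  intro t
  induction t with
  | nil =>
      intro s₀ v c h
      have : s₀ = [] := List.eq_nil_of_length_eq_zero h.symm
      subst this; simp
  | cons a t ih =>
      intro s₀ v c h
      cases s₀ with
      | nil => simp at h
      | cons b s₁ =>
          have hlen : t.length = s₁.length := by simpa using h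
          rw [List.length_cons, List.range_succ, List.foldl_append,
            List.foldl_cons, List.foldl_nil, List.cons_append,
            pvFoldA_cons t.length t.length le_rfl a b t (s₁ ++ v) c,
            ih s₁ v c hlen]
          have hk0 : t.length + 1 - t.length - 1 = 0 := by omega
          simp only [pvBodyA, hk0, Nat.cast_zero, PySem.List.pyGet?_zero_cons]
          by_cases hb : PySem.Str.len b < 3
          · have hb' : ¬ 3 ≤ PySem.Str.len b := by omega
            simp only [hb, if_true, List.zip_cons_cons, List.filter_cons, hb',
              decide_false, List.eraseIdx_cons_zero]
            refine Prod.ext rfl (Prod.ext rfl ?_)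
            push_cast [List.length_cons]
            omega
          · have hb' : 3 ≤ PySem.Str.len b := by omega
            simp only [hb, if_false, List.zip_cons_cons, List.filter_cons, hb',
              decide_true]
            refine Prod.ext rfl (Prod.ext rfl ?_)
            push_cast [List.length_cons]
            omega

-- A's value on any input with |t| ≤ |s|, in terms of the zip/filter survivors.
theorem pvA_closed (t s : List String) (hpre : t.length ≤ s.length) :
    DelTwoLength t s =
      ((pvKept t s t.length).map Prod.fst,
        ((pvKept t s t.length).map Prod.snd) ++ s.drop t.length,
        (t.length : Int) - (pvKept t s t.length).length) := by
  unfold DelTwoLength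
  have hsplit : s = s.take t.length ++ s.drop t.length := (List.take_append_drop _ _).symm
  have hlen : t.length = (s.take t.length).length := by
    simp [List.length_take, Nat.min_eq_left hpre]
  conv_lhs => rw [hsplit]
  rw [pvLoopA_eq t (s.take t.length) (s.drop t.length) 0 hlen]
  have hz : (t.zip (s.take t.length)) = t.zip s := pvZipTake t s
  have htk : (t.zip s).take t.length = t.zip s := by
    apply List.take_of_length_le
    simp [List.length_zip]
  rw [hz]
  unfold pvKept
  rw [htk]
  simp

-- the kept prefix never outgrows the scanned prefix
theorem pvKept_le (t s : List String) (i : Nat) : (pvKept t s i).length ≤ i := by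
  calc (pvKept t s i).length ≤ ((t.zip s).take i).length := List.length_filter_le _ _
    _ ≤ i := by simp [List.length_take]

-- Invariant of B's compaction loop: after i iterations, w = |kept i|, removed = i - w,
-- both lists carry the kept prefix then garbage, and are untouched from index i on.
theorem pvLoopB_inv (t s : List String) (hpre : t.length ≤ s.length) :
    ∀ i, i ≤ t.length →
    ∃ u v : List String,
      (List.range i).foldl pvBodyB (t, s, 0, 0) =
        ((pvKept t s i).map Prod.fst ++ u, (pvKept t s i).map Prod.snd ++ v,
          (pvKept t s i).length, (i : Int) - (pvKept t s i).length) ∧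
      u.length = t.length - (pvKept t s i).length ∧
      v.length = s.length - (pvKept t s i).length ∧
      u.drop (i - (pvKept t s i).length) = t.drop i ∧
      v.drop (i - (pvKept t s i).length) = s.drop i := by
  intro i
  induction i with
  | zero =>
      intro _
      exact ⟨t, s, by simp [pvKept], by simp [pvKept], by simp [pvKept], by simp [pvKept],
        by simp [pvKept]⟩
  | succ i ih =>
      intro hi1
      have hit : i < t.length := Nat.lt_of_succ_le hi1
      have his : i < s.length := Nat.lt_of_lt_of_le hit hpre
      obtain ⟨u, v, hst, hul, hvl, hud, hvd⟩ := ih (Nat.le_of_lt hit)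
      have hw := pvKept_le t s i
      set K := pvKept t s i with hK
      -- the next kept-prefix
      have hzlen : i < (t.zip s).length := by simp [List.length_zip]; omega
      have hztk : (t.zip s).take (i + 1) = (t.zip s).take i ++ [(t[i], s[i])] := by
        rw [List.take_add_one]
        simp [List.getElem?_eq_getElem hzlen]
      have hKsucc : pvKept t s (i + 1) =
          K ++ List.filter (fun p => decide (3 ≤ PySem.Str.len p.2)) [(t[i], s[i])] := by
        rw [hK]
        unfold pvKept
        rw [hztk, List.filter_append]
      -- u, v are nonempty past the kept prefix
      have hune : u ≠ [] := by intro h; subst h; simp at hul; omega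
      have hvne : v ≠ [] := by intro h; subst h; simp at hvl; omega
      obtain ⟨u0, u', rfl⟩ := List.exists_cons_of_ne_nil hune
      obtain ⟨v0, v', rfl⟩ := List.exists_cons_of_ne_nil hvne
      -- reading splitList[i] and targetList[i] in the current state gives s[i], t[i]
      have hreadS : PySem.List.pyGet? (K.map Prod.snd ++ (v0 :: v')) (i : Int) = some s[i] := by
        rw [PySem.List.pyGet?_natCast,
          List.getElem?_append_right (by simp; omega : (K.map Prod.snd).length ≤ i)]
        have h0 : (v0 :: v')[i - (K.map Prod.snd).length]? =
            ((v0 :: v').drop (i - (K.map Prod.snd).length))[0]? := by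
          rw [List.getElem?_drop, Nat.add_zero]
        rw [h0]
        simp only [List.length_map]
        rw [hvd, List.getElem?_drop, Nat.add_zero, List.getElem?_eq_getElem his]
      have hreadT : PySem.List.pyGet? (K.map Prod.fst ++ (u0 :: u')) (i : Int) = some t[i] := by
        rw [PySem.List.pyGet?_natCast,
          List.getElem?_append_right (by simp; omega : (K.map Prod.fst).length ≤ i)]
        have h0 : (u0 :: u')[i - (K.map Prod.fst).length]? =
            ((u0 :: u').drop (i - (K.map Prod.fst).length))[0]? := by
          rw [List.getElem?_drop, Nat.add_zero]
        rw [h0]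
        simp only [List.length_map]
        rw [hud, List.getElem?_drop, Nat.add_zero, List.getElem?_eq_getElem hit]
      rw [List.range_succ, List.foldl_append, List.foldl_cons, List.foldl_nil, hst]
      by_cases hb : PySem.Str.len s[i] < 3
      · -- removed: kept prefix unchanged
        have hnot : ¬ (decide (3 ≤ PySem.Str.len (t[i], s[i]).2) = true) := by
          simp only [decide_eq_true_eq]
          omega
        have hKs : pvKept t s (i + 1) = K := by
          rw [hKsucc, List.filter_cons, if_neg hnot, List.filter_nil, List.append_nil]
        refine ⟨u0 :: u', v0 :: v', ?_, ?_, ?_, ?_, ?_⟩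
        · simp only [pvBodyB, hreadS, hb, if_true]
          rw [hKs]
          refine Prod.ext rfl (Prod.ext rfl (Prod.ext rfl ?_))
          push_cast; ring
        · rw [hKs]; exact hul
        · rw [hKs]; exact hvl
        · rw [hKs]
          have h1 : i + 1 - K.length = (i - K.length) + 1 := by omega
          rw [h1, ← List.drop_drop, hud, List.drop_drop, Nat.add_comm]
        · rw [hKs]
          have h1 : i + 1 - K.length = (i - K.length) + 1 := by omega
          rw [h1, ← List.drop_drop, hvd, List.drop_drop, Nat.add_comm]
      · -- kept: compact t[i], s[i] into slot K.length
        have hb3 : 3 ≤ PySem.Str.len s[i] := by omega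
        have hyes : decide (3 ≤ PySem.Str.len (t[i], s[i]).2) = true := by
          simp only [decide_eq_true_eq]
          omega
        have hKs : pvKept t s (i + 1) = K ++ [(t[i], s[i])] := by
          rw [hKsucc, List.filter_cons, if_pos hyes, List.filter_nil]
        have hsetu : (K.map Prod.fst ++ u0 :: u').set K.length t[i] =
            K.map Prod.fst ++ t[i] :: u' := by
          rw [show K.length = (K.map Prod.fst).length by simp,
            List.set_append_right _ _ (le_refl _)]
          simp
        have hsetv : (K.map Prod.snd ++ v0 :: v').set K.length s[i] =
            K.map Prod.snd ++ s[i] :: v' := by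
          rw [show K.length = (K.map Prod.snd).length by simp,
            List.set_append_right _ _ (le_refl _)]
          simp
        refine ⟨u', v', ?_, ?_, ?_, ?_, ?_⟩
        · simp only [pvBodyB, hreadS, hb, if_false, hreadT]
          rw [hKs]
          refine Prod.ext ?_ (Prod.ext ?_ (Prod.ext ?_ ?_))
          · rw [hsetu]; simp
          · rw [hsetv]; simp
          · simp
          · simp only [List.length_append, List.length_cons, List.length_nil]
            push_cast; ring
        · rw [hKs]; simp at hul ⊢; omega
        · rw [hKs]; simp at hvl ⊢; omega
        · rw [hKs]
          have h1 : i + 1 - (K ++ [(t[i], s[i])]).length = i - K.length := by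
            simp only [List.length_append, List.length_cons, List.length_nil]
            omega
          rw [h1]
          have h2 : u'.drop (i - K.length) = (u0 :: u').drop ((i - K.length) + 1) := by
            simp [List.drop_succ_cons]
          rw [h2, ← List.drop_drop, hud, List.drop_drop, Nat.add_comm]
        · rw [hKs]
          have h1 : i + 1 - (K ++ [(t[i], s[i])]).length = i - K.length := by
            simp only [List.length_append, List.length_cons, List.length_nil]
            omega
          rw [h1]
          have h2 : v'.drop (i - K.length) = (v0 :: v').drop ((i - K.length) + 1) := by
            simp [List.drop_succ_cons]
          rw [h2, ← List.drop_drop, hvd, List.drop_drop, Nat.add_comm]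

-- ===== VERDICT (by name: the statement is the Claim_ definition above) =====
theorem DelTwoLength_spec : Claim_equal_DelTwoLength := by
  intro t s _hdom hpre
  unfold Spec_DelTwoLength
  rw [pvA_closed t s hpre]
  obtain ⟨u, v, hst, hul, hvl, hud, hvd⟩ := pvLoopB_inv t s hpre t.length le_rfl
  have hw := pvKept_le t s t.length
  set K := pvKept t s t.length with hK
  unfold DelTwoLength_alt
  rw [hst]
  simp only
  have htoNat : ((t.length : Int) - K.length).toNat = t.length - K.length := by omega
  rw [htoNat]
  have htake1 : (K.map Prod.fst ++ u).take K.length = K.map Prod.fst :=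
    List.take_left' (by simp)
  have htake2 : (K.map Prod.snd ++ v).take K.length = K.map Prod.snd :=
    List.take_left' (by simp)
  have hdrop1 : (K.map Prod.fst ++ u).drop (K.length + (t.length - K.length)) = [] := by
    apply List.drop_eq_nil_of_le
    simp only [List.length_append, List.length_map, hul]
    omega
  have hdrop2 : (K.map Prod.snd ++ v).drop (K.length + (t.length - K.length)) =
      s.drop t.length := by
    have hL : K.length + (t.length - K.length) =
        (K.map Prod.snd).length + (t.length - K.length) := by simp
    rw [hL, List.drop_append, List.drop_eq_nil_of_le (Nat.le_add_right _ _),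
      Nat.add_sub_cancel_left, hvd]
    simp
  rw [htake1, htake2, hdrop1, hdrop2]
  simp
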